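-- pv_equiv track=rewrite | github.com/kimdy003/Python_study | 4_etc/intern/2.py | solution
-- ===== SOURCE A (Python) =====
-- def solution(t, r):
--     answer = []
--     size = max(t)
--     dic = {i: [] for i in range(size + 2)}
--
--     for i in range(len(r)):
--         dic[t[i]] = dic.get(t[i], []) + [(r[i], t[i], i)]  # 우선순위, 도착 순서, 손님 아이디
--
--     for i in range(size + 1):
--         if len(dic[i]) == 1:
--             c = dic[i]
--             answer.append(c[0][2])
--
--         elif len(dic[i]) > 1:
--             c = dic[i]
--             c = sorted(c, key=lambda x: (x[0], x[1], x[2]))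
--             answer.append(c[0][2])
--             dic[i + 1] = dic.get(i + 1, []) + c[1:]
--
--     if len(dic[size + 1]):
--         for c in dic[size + 1]:
--             answer.append(c[2])
--
--     return answer
-- ===== SOURCE B (Python) =====
-- def solution(t, r):
--     size = max(t)
--     buckets = [[] for _ in range(size + 1)]
--     for i in range(len(r)):
--         a = t[i]
--         if a >= 0:                       # only arrivals inside the simulated slots are queued
--             buckets[a].append((r[i], a, i))
--     pending = []                         # kept sorted ascending by (priority, arrival, id)
--     answer = []
--     for day in range(size + 1):
--         for cust in buckets[day]:
--             lo = 0
--             while lo < len(pending) and pending[lo] < cust: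
--                 lo += 1
--             pending.insert(lo, cust)
--         if pending:
--             answer.append(pending.pop(0)[2])
--     for cust in pending:
--         answer.append(cust[2])
--     return answer
-- ===== Notes on version B (the rewrite author's own statement) =====
-- stated objective: faster
-- what changed: B replaces A's dict keyed over range(size+2) and its per-slot re-sort of the whole waiting list by a plain bucket list plus one ordered waiting list maintained incrementally by sorted insertion (no dict, no sort call), serving the head each slot.
import Mathlib
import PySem

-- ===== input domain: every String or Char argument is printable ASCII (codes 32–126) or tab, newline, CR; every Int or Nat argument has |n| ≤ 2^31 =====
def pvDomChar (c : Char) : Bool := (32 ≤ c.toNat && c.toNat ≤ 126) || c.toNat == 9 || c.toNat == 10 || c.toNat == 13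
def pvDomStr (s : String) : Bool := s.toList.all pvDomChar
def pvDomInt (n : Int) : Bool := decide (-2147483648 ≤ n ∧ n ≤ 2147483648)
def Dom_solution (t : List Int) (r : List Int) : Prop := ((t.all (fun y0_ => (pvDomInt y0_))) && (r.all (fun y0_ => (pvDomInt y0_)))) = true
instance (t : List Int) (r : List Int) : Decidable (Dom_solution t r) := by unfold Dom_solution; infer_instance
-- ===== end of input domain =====

-- B replaces A's dict-of-slots with per-slot re-sorting by a single ordered waiting list
-- maintained by insertion (no dict, no sort call); objective: faster (constant-factor mechanism).

-- Python's 3-tuple comparison (priority, arrival, id) is the lexicographic order: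
def pvKey (x : Int × Int × Int) : Lex (Int × Lex (Int × Int)) := toLex (x.1, toLex (x.2.1, x.2.2))

-- ===== PORT A =====
-- the body of A's serving loop, lambda-lifted (state = (dic, answer)):
def pvABody (st : PySem.Dict Int (List (Int × Int × Int)) × List Int) (i : Int) :
    PySem.Dict Int (List (Int × Int × Int)) × List Int :=
  let c := st.1.getD i []           -- c = dic[i] (key present for 0 ≤ i ≤ size+1 under Pre_)
  if c.length = 1 then
    (st.1, st.2 ++ [(PySem.List.pyGetD c 0 (0, 0, 0)).2.2])
  else if 1 < c.length then
    let cs := PySem.List.sorted c pvKey false    -- sorted(c, key=lambda x: (x[0], x[1], x[2]))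
    (st.1.insert (i + 1) (st.1.getD (i + 1) [] ++ PySem.List.slice cs (some 1) none),
     st.2 ++ [(PySem.List.pyGetD cs 0 (0, 0, 0)).2.2])
  else (st.1, st.2)

def solution (t : List Int) (r : List Int) : List Int :=
  match PySem.List.max? t (fun x => x) with
  | none => []   -- Python: max([]) raises ValueError; excluded by Pre_solution
  | some size =>
    -- dic = {i: [] for i in range(size + 2)}
    let dic0 : PySem.Dict Int (List (Int × Int × Int)) :=
      (PySem.List.pyRange 0 (size + 2) 1).foldl (fun d i => d.insert i []) PySem.Dict.empty
    -- for i in range(len(r)): dic[t[i]] = dic.get(t[i], []) + [(r[i], t[i], i)]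
    let dic1 :=
      (PySem.List.pyRange 0 (PySem.List.len r) 1).foldl
        (fun d i =>
          d.insert (PySem.List.pyGetD t i 0)
            (d.getD (PySem.List.pyGetD t i 0) [] ++
              [(PySem.List.pyGetD r i 0, PySem.List.pyGetD t i 0, i)]))
        dic0
    -- for i in range(size + 1): …
    let st := (PySem.List.pyRange 0 (size + 1) 1).foldl pvABody (dic1, [])
    -- if len(dic[size + 1]): for c in dic[size + 1]: answer.append(c[2])
    if (st.1.getD (size + 1) []).length ≠ 0 then
      (st.1.getD (size + 1) []).foldl (fun ans c => ans ++ [c.2.2]) st.2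
    else st.2

-- ===== PORT B =====
-- 'lo = 0; while lo < len(pending) and pending[lo] < cust: lo += 1; pending.insert(lo, cust)'
def pvInsert (p : List (Int × Int × Int)) (cust : Int × Int × Int) : List (Int × Int × Int) :=
  match p with
  | [] => [cust]
  | y :: ys => if pvKey y < pvKey cust then y :: pvInsert ys cust else cust :: y :: ys

-- buckets = [[] for _ in range(size + 1)]
-- for i in range(len(r)): a = t[i]; if a >= 0: buckets[a].append((r[i], a, i))
def pvBBuckets (t : List Int) (r : List Int) (size : Int) : List (List (Int × Int × Int)) :=
  (PySem.List.pyRange 0 (PySem.List.len r) 1).foldl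
    (fun b i =>
      if 0 ≤ PySem.List.pyGetD t i 0 then
        PySem.List.pySetD b (PySem.List.pyGetD t i 0)
          (PySem.List.pyGetD b (PySem.List.pyGetD t i 0) [] ++
            [(PySem.List.pyGetD r i 0, PySem.List.pyGetD t i 0, i)])
      else b)
    ((PySem.List.pyRange 0 (size + 1) 1).map (fun _ => []))

-- the body of B's day loop (state = (pending, answer)): insert the day's arrivals into the
-- sorted pending list, then serve (pop) its head if any
def pvBBody (buckets : List (List (Int × Int × Int)))
    (st : List (Int × Int × Int) × List Int) (day : Int) :
    List (Int × Int × Int) × List Int :=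
  let pending := (PySem.List.pyGetD buckets day []).foldl pvInsert st.1
  if pending ≠ [] then
    (pending.tail, st.2 ++ [(PySem.List.pyGetD pending 0 (0, 0, 0)).2.2])
  else (pending, st.2)

def solution_alt (t : List Int) (r : List Int) : List Int :=
  match PySem.List.max? t (fun x => x) with
  | none => []   -- max([]) raises in Python; excluded by Pre_solution
  | some size =>
    let st := (PySem.List.pyRange 0 (size + 1) 1).foldl (pvBBody (pvBBuckets t r size)) ([], [])
    -- for cust in pending: answer.append(cust[2])
    st.1.foldl (fun ans c => ans ++ [c.2.2]) st.2

-- ===== PRECONDITION & SPEC =====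
-- Pre_ is exactly where A returns normally: max([]) raises ValueError on empty t,
-- t[i] raises IndexError when len(r) > len(t), and when max(t) ≤ -2 the final
-- dic[size + 1] lookup raises KeyError.
def Pre_solution (t : List Int) (r : List Int) : Prop :=
  t ≠ [] ∧ r.length ≤ t.length ∧ ∃ x ∈ t, -1 ≤ x
instance (t : List Int) (r : List Int) : Decidable (Pre_solution t r) := by
  unfold Pre_solution; infer_instance

def pvWitness_solution : List Int × List Int := ([0, 1, 0], [3, 1, 2])

def Spec_solution (t : List Int) (r : List Int) (out : List Int) : Prop := out = solution_alt t r
instance (t : List Int) (r : List Int) (out : List Int) : Decidable (Spec_solution t r out) := by unfold Spec_solution; infer_instance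

-- ===== CLAIM (what is proved, stated in full; the proofs are below) =====
def Claim_equal_solution : Prop := ∀ (t : List Int) (r : List Int), Dom_solution t r → Pre_solution t r → Spec_solution t r (solution t r)

-- ===== LEMMAS AND PROOFS =====

-- the list of customers (priority, arrival, id) for indices 0 ≤ k < m, in index order
def pvCusts (t r : List Int) (m : Nat) : List (Int × Int × Int) :=
  (List.range m).map (fun k => (r.getD k 0, t.getD k 0, (k : Int)))

-- the customers arriving in slot j
def pvArr (t r : List Int) (j : Int) : List (Int × Int × Int) :=
  (pvCusts t r r.length).filter (fun x => x.2.1 == j)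

lemma pvKey_inj {x y : Int × Int × Int} (h : pvKey x = pvKey y) : x = y := by
  obtain ⟨x1, x2, x3⟩ := x; obtain ⟨y1, y2, y3⟩ := y
  simp [pvKey, Prod.ext_iff] at h
  obtain ⟨h1, h2, h3⟩ := h
  simp [h1, h2, h3]

lemma pvCusts_succ (t r : List Int) (m : Nat) :
    pvCusts t r (m + 1) = pvCusts t r m ++ [(r.getD m 0, t.getD m 0, (m : Int))] := by
  simp [pvCusts, List.range_succ]

lemma pvCusts_key_nodup (t r : List Int) (m : Nat) :
    ((pvCusts t r m).map pvKey).Nodup := by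
  unfold pvCusts
  rw [List.map_map]
  apply List.Nodup.map _ List.nodup_range
  intro a b hab
  have := pvKey_inj hab
  simpa using congrArg (fun z => z.2.2) this

lemma pvCusts_mem {t r : List Int} {m : Nat} {x : Int × Int × Int}
    (h : x ∈ pvCusts t r m) : ∃ k, k < m ∧ x = (r.getD k 0, t.getD k 0, (k : Int)) := by
  unfold pvCusts at h
  simp only [List.mem_map, List.mem_range] at h
  obtain ⟨k, hk, he⟩ := h
  exact ⟨k, hk, he.symm⟩

-- ----- the insertion helper of B -----

lemma pvInsert_perm (p : List (Int × Int × Int)) (x : Int × Int × Int) :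
    (pvInsert p x).Perm (x :: p) := by
  induction p with
  | nil => simp [pvInsert]
  | cons y ys ih =>
    simp only [pvInsert]
    split
    · exact (ih.cons y).trans (List.Perm.swap x y ys)
    · exact List.Perm.refl _

lemma pvInsert_pairwise {p : List (Int × Int × Int)} {x : Int × Int × Int}
    (hp : p.Pairwise (fun a b => pvKey a < pvKey b))
    (hx : ∀ y ∈ p, pvKey y ≠ pvKey x) :
    (pvInsert p x).Pairwise (fun a b => pvKey a < pvKey b) := by
  induction p with
  | nil => simp [pvInsert]
  | cons y ys ih =>
    rw [List.pairwise_cons] at hp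
    simp only [pvInsert]
    split
    · rename_i hlt
      rw [List.pairwise_cons]
      refine ⟨?_, ih hp.2 (fun z hz => hx z (List.mem_cons_of_mem _ hz))⟩
      intro z hz
      have hz' := (pvInsert_perm ys x).mem_iff.mp hz
      rcases List.mem_cons.mp hz' with h | h
      · subst h; exact hlt
      · exact hp.1 z h
    · rename_i hnlt
      have hyx : pvKey x < pvKey y := by
        rcases lt_or_eq_of_le (not_lt.mp hnlt) with h | h
        · exact h
        · exact absurd h.symm (hx y (List.mem_cons_self ..))
      rw [List.pairwise_cons]
      refine ⟨?_, List.pairwise_cons.mpr hp⟩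
      intro z hz
      rcases List.mem_cons.mp hz with h | h
      · subst h; exact hyx
      · exact hyx.trans (hp.1 z h)

lemma pvInsert_foldl {l p : List (Int × Int × Int)}
    (hp : p.Pairwise (fun a b => pvKey a < pvKey b))
    (hnd : ((p ++ l).map pvKey).Nodup) :
    ((l.foldl pvInsert p).Perm (p ++ l)) ∧
      (l.foldl pvInsert p).Pairwise (fun a b => pvKey a < pvKey b) := by
  induction l generalizing p with
  | nil => simpa using hp
  | cons x l ih =>
    simp only [List.foldl_cons]
    have hxfresh : ∀ y ∈ p, pvKey y ≠ pvKey x := by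
      rw [List.map_append, List.nodup_append] at hnd
      intro y hy he
      exact hnd.2.2 _ (List.mem_map_of_mem hy) _ (by simp) he
    have hp' : (pvInsert p x).Pairwise (fun a b => pvKey a < pvKey b) :=
      pvInsert_pairwise hp hxfresh
    have hperm : (pvInsert p x ++ l).Perm (p ++ x :: l) := by
      exact ((pvInsert_perm p x).append_right l).trans List.perm_middle.symm
    have hnd' : ((pvInsert p x ++ l).map pvKey).Nodup :=
      (hnd.perm ((hperm.map pvKey).symm))
    obtain ⟨hperm2, hpw2⟩ := ih hp' hnd'
    exact ⟨hperm2.trans hperm, hpw2⟩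

-- ----- grouping: A's dict and B's bucket list hold the same per-slot arrival lists -----

lemma pvDic0_getD (ks : List Int) (d : PySem.Dict Int (List (Int × Int × Int)))
    (hd : ∀ j, d.getD j [] = []) :
    ∀ j, (ks.foldl (fun d i => d.insert i []) d).getD j [] = [] := by
  induction ks generalizing d with
  | nil => exact hd
  | cons k ks ih =>
    intro j
    simp only [List.foldl_cons]
    apply ih
    intro j'
    rw [PySem.Dict.getD_insert]
    split
    · rfl
    · exact hd j'

lemma pvGroupA (t r : List Int) (d : PySem.Dict Int (List (Int × Int × Int)))
    (hd : ∀ j, d.getD j [] = []) (m : Nat) :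
    ∀ j, ((PySem.List.pyRange 0 (m : Int) 1).foldl
      (fun d i =>
        d.insert (PySem.List.pyGetD t i 0)
          (d.getD (PySem.List.pyGetD t i 0) [] ++
            [(PySem.List.pyGetD r i 0, PySem.List.pyGetD t i 0, i)])) d).getD j []
      = (pvCusts t r m).filter (fun x => x.2.1 == j) := by
  induction m with
  | zero =>
    intro j
    rw [PySem.List.pyRange_one_eq_nil (by omega)]
    simpa [pvCusts] using hd j
  | succ m ih =>
    intro j
    have hc : ((m + 1 : Nat) : Int) = (m : Int) + 1 := by push_cast; ring
    rw [hc, PySem.List.pyRange_one_succ_right (by exact_mod_cast Nat.zero_le m),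
      List.foldl_append]
    simp only [List.foldl_cons, List.foldl_nil, PySem.List.pyGetD_natCast]
    rw [PySem.Dict.getD_insert, pvCusts_succ, List.filter_append]
    split
    · rename_i hj
      subst hj
      simp [ih]
    · rename_i hj
      simp [List.filter_cons, ih j]
      simpa [List.getD] using fun h => hj h.symm

lemma pvFoldl_range_succ {β : Type} (f : β → Int → β) (init : β) (m : Nat) :
    (PySem.List.pyRange 0 ((m : Int) + 1) 1).foldl f init =
      f ((PySem.List.pyRange 0 (m : Int) 1).foldl f init) (m : Int) := by
  rw [PySem.List.pyRange_one_succ_right (by positivity), List.foldl_append]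
  rfl

lemma pvGetD_nil {α : Type} (xs : List (List α)) (h : ∀ x ∈ xs, x = []) (j : Int) :
    PySem.List.pyGetD xs j [] = [] := by
  rcases he : PySem.List.pyGet? xs j with _ | x
  · simp [PySem.List.pyGetD, he]
  · have := PySem.List.mem_of_pyGet?_eq_some xs he
    simp [PySem.List.pyGetD, he, h x this]

-- B's bucket fold, cut off after m customers (proof device)
def pvBFold (t r : List Int) (size : Int) (m : Nat) : List (List (Int × Int × Int)) :=
  (PySem.List.pyRange 0 (m : Int) 1).foldl
    (fun b i =>
      if 0 ≤ PySem.List.pyGetD t i 0 then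
        PySem.List.pySetD b (PySem.List.pyGetD t i 0)
          (PySem.List.pyGetD b (PySem.List.pyGetD t i 0) [] ++
            [(PySem.List.pyGetD r i 0, PySem.List.pyGetD t i 0, i)])
      else b)
    ((PySem.List.pyRange 0 (size + 1) 1).map (fun _ => []))

lemma pvBBuckets_eq (t r : List Int) (size : Int) :
    pvBBuckets t r size = pvBFold t r size r.length := by
  unfold pvBBuckets pvBFold
  rw [PySem.List.len_eq]

lemma pvGroupB (t r : List Int) (size : Int) (m : Nat) (hm : m ≤ r.length)
    (hb : ∀ k, k < r.length → t.getD k 0 ≤ size) :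
    (pvBFold t r size m).length = (size + 1).toNat ∧
      ∀ j : Int, 0 ≤ j →
        PySem.List.pyGetD (pvBFold t r size m) j [] =
          (pvCusts t r m).filter (fun x => x.2.1 == j) := by
  induction m with
  | zero =>
    have h0 : PySem.List.pyRange 0 ((0 : Nat) : Int) 1 = [] :=
      PySem.List.pyRange_one_eq_nil (by norm_num)
    constructor
    · simp [pvBFold, PySem.List.length_pyRange_one]
    · intro j hj
      rw [pvBFold, h0]
      simp only [List.foldl_nil]
      rw [pvGetD_nil]
      · simp [pvCusts]
      · intro x hx
        rcases List.mem_map.mp hx with ⟨_, _, hx2⟩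
        exact hx2.symm
  | succ m ih =>
    obtain ⟨ihlen, ihget⟩ := ih (by omega)
    have h1m : t.getD m 0 ≤ size := hb m (by omega)
    have hc : ((m + 1 : Nat) : Int) = (m : Int) + 1 := by push_cast; ring
    by_cases h0m : 0 ≤ t.getD m 0
    · have hstep : pvBFold t r size (m + 1) =
          PySem.List.pySetD (pvBFold t r size m) (t.getD m 0)
            (PySem.List.pyGetD (pvBFold t r size m) (t.getD m 0) [] ++
              [(r.getD m 0, t.getD m 0, (m : Int))]) := by
        rw [pvBFold, hc, pvFoldl_range_succ]
        simp only [PySem.List.pyGetD_natCast]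
        rw [if_pos (by simpa [List.getD] using h0m)]
        rfl
      have hn : (t.getD m 0) = (((t.getD m 0).toNat : Nat) : Int) := (Int.toNat_of_nonneg h0m).symm
      have hnlen : (t.getD m 0).toNat < (pvBFold t r size m).length := by
        rw [ihlen]; omega
      constructor
      · rw [hstep, hn, PySem.List.pySetD_natCast, List.length_set, ihlen]
      · intro j hj
        have hjn : j = ((j.toNat : Nat) : Int) := (Int.toNat_of_nonneg hj).symm
        rw [hstep, hn, hjn,
          PySem.List.pyGetD_pySetD_natCast _ _ _ _ _ hnlen,
          pvCusts_succ, List.filter_append]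
        split
        · rename_i hjeq
          have hjt : j = t.getD m 0 := by omega
          rw [← hn, ← hjn, ihget (t.getD m 0) h0m]
          simp [hjt]
        · rename_i hjne
          have hjt : ¬ (t.getD m 0 = j) := by omega
          rw [← hjn, ihget j hj]
          have hbe : ¬ t[m]?.getD 0 = j := by simpa [List.getD] using hjt
          simp [hbe]
    · -- negative arrival: B queues nothing, and the new customer matches no slot j ≥ 0
      have hstep : pvBFold t r size (m + 1) = pvBFold t r size m := by
        rw [pvBFold, hc, pvFoldl_range_succ]
        simp only [PySem.List.pyGetD_natCast]
        rw [if_neg (by simpa [List.getD] using h0m)]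
        rfl
      constructor
      · rw [hstep, ihlen]
      · intro j hj
        rw [hstep, ihget j hj, pvCusts_succ, List.filter_append]
        have hbe : ¬ t[m]?.getD 0 = j := by
          simp only [List.getD] at h0m ⊢
          omega
        simp [hbe]

-- the two loop states after b slots (proof devices; definitionally the ports' folds)
def pvADic1 (t r : List Int) (size : Int) : PySem.Dict Int (List (Int × Int × Int)) :=
  (PySem.List.pyRange 0 (PySem.List.len r) 1).foldl
    (fun d i =>
      d.insert (PySem.List.pyGetD t i 0)
        (d.getD (PySem.List.pyGetD t i 0) [] ++
          [(PySem.List.pyGetD r i 0, PySem.List.pyGetD t i 0, i)]))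
    ((PySem.List.pyRange 0 (size + 2) 1).foldl (fun d i => d.insert i []) PySem.Dict.empty)

def pvAState (t r : List Int) (size b : Int) :
    PySem.Dict Int (List (Int × Int × Int)) × List Int :=
  (PySem.List.pyRange 0 b 1).foldl pvABody (pvADic1 t r size, [])

def pvBState (t r : List Int) (size b : Int) : List (Int × Int × Int) × List Int :=
  (PySem.List.pyRange 0 b 1).foldl (pvBBody (pvBBuckets t r size)) ([], [])

lemma pvAState_succ (t r : List Int) (size b : Int) (hb : 0 ≤ b) :
    pvAState t r size (b + 1) = pvABody (pvAState t r size b) b := by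
  unfold pvAState
  rw [PySem.List.pyRange_one_succ_right hb, List.foldl_append]
  rfl

lemma pvBState_succ (t r : List Int) (size b : Int) (hb : 0 ≤ b) :
    pvBState t r size (b + 1) = pvBBody (pvBBuckets t r size) (pvBState t r size b) b := by
  unfold pvBState
  rw [PySem.List.pyRange_one_succ_right hb, List.foldl_append]
  rfl

lemma pvADic1_getD (t r : List Int) (size : Int) (j : Int) :
    (pvADic1 t r size).getD j [] = pvArr t r j := by
  unfold pvADic1 pvArr
  rw [PySem.List.len_eq]
  exact pvGroupA t r _ (pvDic0_getD _ _ (fun _ => rfl)) r.length j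

lemma pvArr_mem {t r : List Int} {j : Int} {x : Int × Int × Int} (h : x ∈ pvArr t r j) :
    x ∈ pvCusts t r r.length ∧ x.2.1 = j := by
  unfold pvArr at h
  have := List.mem_filter.mp h
  refine ⟨this.1, by simpa using this.2⟩

lemma pvInv (t r : List Int) (size : Int)
    (hb : ∀ k, k < r.length → t.getD k 0 ≤ size)
    (m : Nat) (hm : (m : Int) ≤ size + 1) :
    (pvAState t r size m).2 = (pvBState t r size m).2 ∧
    (pvBState t r size m).1.Pairwise (fun a b => pvKey a < pvKey b) ∧
    (∀ x ∈ (pvBState t r size m).1, x ∈ pvCusts t r r.length ∧ x.2.1 < (m : Int)) ∧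
    ∀ j : Int, (m : Int) ≤ j →
      (pvAState t r size m).1.getD j [] =
        pvArr t r j ++ (if j = (m : Int) then (pvBState t r size m).1 else []) := by
  induction m with
  | zero =>
    refine ⟨rfl, ?_, ?_, ?_⟩
    · simp [pvBState, PySem.List.pyRange_one_eq_nil (le_refl (0 : Int))]
    · simp [pvBState, PySem.List.pyRange_one_eq_nil (le_refl (0 : Int))]
    · intro j hj
      have h0 : PySem.List.pyRange 0 ((0 : Nat) : Int) 1 = [] :=
        PySem.List.pyRange_one_eq_nil (by norm_num)
      simp only [pvAState, pvBState, h0, List.foldl_nil]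
      rw [pvADic1_getD]
      simp
  | succ m ih =>
    obtain ⟨hans, hpw, hmem, hdic⟩ := ih (by push_cast at hm ⊢; omega)
    have hm' : (m : Int) ≤ size := by push_cast at hm; omega
    have hcast : ((m + 1 : Nat) : Int) = (m : Int) + 1 := by push_cast; ring
    rw [hcast, pvAState_succ t r size m (by positivity), pvBState_succ t r size m (by positivity)]
    set dic := (pvAState t r size m).1 with hdicdef
    set ansA := (pvAState t r size m).2 with hansAdef
    set pend := (pvBState t r size m).1 with hpenddef
    set ansB := (pvBState t r size m).2 with hansBdef
    have harr : dic.getD (m : Int) [] = pvArr t r m ++ pend := by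
      have := hdic (m : Int) le_rfl
      simpa using this
    have hbuck : PySem.List.pyGetD (pvBBuckets t r size) (m : Int) [] = pvArr t r m := by
      rw [pvBBuckets_eq]
      exact (pvGroupB t r size r.length le_rfl hb).2 (m : Int) (by positivity)
    -- distinct sort keys in pend ++ arrivals
    have hndpend : (pend.map pvKey).Nodup := by
      have h1 : (pend.map pvKey).Pairwise (· < ·) :=
        List.Pairwise.map pvKey (fun a b h => h) hpw
      exact h1.imp ne_of_lt
    have hndarr : ((pvArr t r (m : Int)).map pvKey).Nodup := by
      have hsub : (pvArr t r (m : Int)).Sublist (pvCusts t r r.length) := by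
        unfold pvArr; exact List.filter_sublist
      exact (pvCusts_key_nodup t r r.length).sublist (hsub.map pvKey)
    have hdisj : ∀ a ∈ pend.map pvKey, ∀ c ∈ (pvArr t r (m : Int)).map pvKey, a ≠ c := by
      intro a ha c hc hac
      rcases List.mem_map.mp ha with ⟨y, hy, hya⟩
      rcases List.mem_map.mp hc with ⟨z, hz, hzc⟩
      have : y = z := pvKey_inj (by rw [hya, hzc, hac])
      have h1 := (hmem y hy).2
      have h2 := (pvArr_mem hz).2
      rw [this, h2] at h1
      exact absurd h1 (lt_irrefl _)
    have hnd : ((pend ++ pvArr t r (m : Int)).map pvKey).Nodup := by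
      rw [List.map_append, List.nodup_append]
      exact ⟨hndpend, hndarr, hdisj⟩
    obtain ⟨hperm, hpw'⟩ := pvInsert_foldl hpw hnd
    have hpermc : ((pvArr t r (m : Int)).foldl pvInsert pend).Perm (dic.getD (m : Int) []) := by
      rw [harr]
      exact hperm.trans List.perm_append_comm
    have hsorted : PySem.List.sorted (dic.getD (m : Int) []) pvKey =
        (pvArr t r (m : Int)).foldl pvInsert pend :=
      PySem.List.sorted_eq_of_perm_of_pairwise_lt _ _ _ hpermc hpw'
    -- both step bodies
    simp only [pvABody, pvBBody, hbuck]
    rw [← hdicdef, ← hansAdef, ← hpenddef, ← hansBdef]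
    by_cases h1 : (dic.getD (m : Int) []).length = 1
    · -- exactly one waiting customer: serve it, nothing carried
      obtain ⟨x, hx⟩ := List.length_eq_one_iff.mp h1
      have hpend1 : (pvArr t r (m : Int)).foldl pvInsert pend = [x] := by
        rw [← hsorted, hx]
        exact PySem.List.sorted_eq_self_of_pairwise _ _ (by simp)
      rw [if_pos h1, hpend1, hx]
      refine ⟨?_, ?_, ?_, ?_⟩
      · simp [hans, PySem.List.pyGetD_zero_cons]
      · simp
      · simp
      · intro j hj
        have hd := hdic j (by omega)
        rw [if_neg (by omega : ¬ j = (m : Int))] at hd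
        simp [hd]
    · by_cases h2 : 1 < (dic.getD (m : Int) []).length
      · -- several waiting customers: serve the least, carry the sorted rest
        have hne : (pvArr t r (m : Int)).foldl pvInsert pend ≠ [] := by
          intro h0
          have := hpermc.length_eq
          rw [h0] at this
          simp at this
          omega
        obtain ⟨y, tl, hyt⟩ := List.exists_cons_of_ne_nil hne
        rw [if_neg h1, if_pos h2, hsorted, hyt]
        rw [hyt] at hpw' hpermc
        refine ⟨?_, ?_, ?_, ?_⟩
        · simp [hans, PySem.List.pyGetD_zero_cons]
        · simp only [ne_eq, reduceCtorEq, not_false_eq_true, if_true]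
          exact (List.pairwise_cons.mp hpw').2
        · simp only [ne_eq, reduceCtorEq, not_false_eq_true, if_true]
          intro x hxtl
          have hxc : x ∈ dic.getD (m : Int) [] := hpermc.mem_iff.mp (List.mem_cons_of_mem _ hxtl)
          rw [harr] at hxc
          rcases List.mem_append.mp hxc with hxa | hxp
          · have := pvArr_mem hxa
            exact ⟨this.1, by omega⟩
          · have := hmem x hxp
            exact ⟨this.1, by omega⟩
        · intro j hj
          simp only [ne_eq, reduceCtorEq, not_false_eq_true, if_true, List.tail_cons,
            PySem.List.slice_from_one]
          rw [PySem.Dict.getD_insert]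
          by_cases hj1 : j = (m : Int) + 1
          · rw [if_pos hj1, if_pos hj1]
            have hd := hdic ((m : Int) + 1) (by omega)
            rw [if_neg (by omega : ¬ (m : Int) + 1 = (m : Int))] at hd
            rw [hj1, hd]
            simp
          · rw [if_neg hj1, if_neg hj1]
            have hd := hdic j (by omega)
            rw [if_neg (by omega : ¬ j = (m : Int))] at hd
            simp [hd]
      · -- no waiting customer: both sides idle
        have hc0 : dic.getD (m : Int) [] = [] := List.eq_nil_of_length_eq_zero (by omega)
        have harr0 : pvArr t r (m : Int) = [] ∧ pend = [] := by
          rw [hc0] at harr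
          exact (List.append_eq_nil_iff.mp harr.symm)
        have hp0 : (pvArr t r (m : Int)).foldl pvInsert pend = [] := by
          rw [harr0.1, harr0.2]
          rfl
        rw [if_neg h1, if_neg h2, hp0]
        refine ⟨by simp [hans], by simp, by simp, ?_⟩
        · intro j hj
          have hd := hdic j (by omega)
          rw [if_neg (by omega : ¬ j = (m : Int))] at hd
          simp [hd]

lemma pvSolutionA_eq (t r : List Int) (size : Int)
    (h : PySem.List.max? t (fun x => x) = some size) :
    solution t r =
      (if ((pvAState t r size (size + 1)).1.getD (size + 1) []).length ≠ 0 then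
        ((pvAState t r size (size + 1)).1.getD (size + 1) []).foldl
          (fun ans c => ans ++ [c.2.2]) (pvAState t r size (size + 1)).2
      else (pvAState t r size (size + 1)).2) := by
  unfold solution pvAState pvADic1
  rw [h]

lemma pvSolutionB_eq (t r : List Int) (size : Int)
    (h : PySem.List.max? t (fun x => x) = some size) :
    solution_alt t r =
      (pvBState t r size (size + 1)).1.foldl (fun ans c => ans ++ [c.2.2])
        (pvBState t r size (size + 1)).2 := by
  unfold solution_alt pvBState
  rw [h]

-- ===== VERDICT (by name: the statement is the Claim_ definition above) =====
theorem solution_spec : Claim_equal_solution := by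
  intro t r hdom hpre
  obtain ⟨hne, hlen, hsome⟩ := hpre
  unfold Spec_solution
  rcases hmax : PySem.List.max? t (fun x => x) with _ | size
  · exact absurd ((PySem.List.max?_eq_none_iff t _).mp hmax) hne
  · obtain ⟨x, hxt, hxge⟩ := hsome
    have hmaxle := PySem.List.max?_isMax hmax
    have hsz : -1 ≤ size := le_trans hxge (hmaxle x hxt)
    have hb : ∀ k, k < r.length → t.getD k 0 ≤ size := by
      intro k hk
      have hkt : k < t.length := by omega
      rw [List.getD_eq_getElem t 0 hkt]
      exact hmaxle _ (List.getElem_mem hkt)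
    have hMc : (((size + 1).toNat : Nat) : Int) = size + 1 := Int.toNat_of_nonneg (by omega)
    obtain ⟨hans, hpw, hmem, hdic⟩ := pvInv t r size hb (size + 1).toNat (by omega)
    rw [pvSolutionA_eq t r size hmax, pvSolutionB_eq t r size hmax, ← hMc]
    have harrM : pvArr t r (((size + 1).toNat : Nat) : Int) = [] := by
      rw [hMc]
      unfold pvArr
      apply List.filter_eq_nil_iff.mpr
      intro x hx
      obtain ⟨k, hk, hxe⟩ := pvCusts_mem hx
      have hbk : t.getD k 0 ≤ size := hb k hk
      rw [hxe]
      show ¬ ((t.getD k 0 : Int) == size + 1) = true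
      simp only [beq_iff_eq]
      omega
    have hget : (pvAState t r size (((size + 1).toNat : Nat) : Int)).1.getD
        (((size + 1).toNat : Nat) : Int) [] =
        (pvBState t r size (((size + 1).toNat : Nat) : Int)).1 := by
      have h1 := hdic _ le_rfl
      rw [if_pos rfl, harrM] at h1
      simpa using h1
    rw [hget, hans]
    rcases hp : (pvBState t r size (((size + 1).toNat : Nat) : Int)).1 with _ | ⟨y, tlp⟩
    · simp
    · rw [if_pos (by simp)]
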